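-- pv_equiv track=rewrite | github.com/usemacaw/macaw-openvoice | macaw/alignment/ctc_aligner.py | _merge_chars_to_words
-- ===== SOURCE A (Python) =====
-- _WORD_SEPARATOR = "|"
--
-- def _merge_chars_to_words(
--     char_items: list[tuple[str, int, int]],
-- ) -> list[tuple[str, int, int]]:
--     """Merge character-level items into word-level items.
--
--     Word boundaries are detected by the ``|`` separator token.
--     Returns list of (word, start_ms, duration_ms).
--     """
--     if not char_items:
--         return []
--
--     words: list[tuple[str, int, int]] = []
--     current_word_chars: list[str] = []
--     word_start_ms = 0
--
--     for char, start_ms, _duration_ms in char_items: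
--         if char == _WORD_SEPARATOR:
--             # Word boundary — emit accumulated word.
--             if current_word_chars:
--                 word_text = "".join(current_word_chars)
--                 word_end_ms = start_ms  # separator start = previous word end
--                 words.append((word_text, word_start_ms, word_end_ms - word_start_ms))
--                 current_word_chars = []
--         else:
--             if not current_word_chars:
--                 word_start_ms = start_ms
--             current_word_chars.append(char)
--
--     # Emit final word.
--     if current_word_chars:
--         word_text = "".join(current_word_chars)
--         last_char = char_items[-1]
--         word_end_ms = last_char[1] + last_char[2]
--         words.append((word_text, word_start_ms, word_end_ms - word_start_ms))
--
--     return words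
-- ===== SOURCE B (Python) =====
-- _WORD_SEPARATOR = "|"
--
--
-- def _merge_chars_to_words(
--     char_items: list[tuple[str, int, int]],
-- ) -> list[tuple[str, int, int]]:
--     """Merge character-level items into word-level items (run-scan version)."""
--     n = len(char_items)
--     words: list[tuple[str, int, int]] = []
--     i = 0
--     while i < n:
--         if char_items[i][0] == _WORD_SEPARATOR:
--             i += 1
--             continue
--         j = i
--         while j < n and char_items[j][0] != _WORD_SEPARATOR:
--             j += 1
--         word = "".join(c for c, _, _ in char_items[i:j])
--         start = char_items[i][1]
--         if j < n:
--             end = char_items[j][1]  # start of the terminating separator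
--         else:
--             end = char_items[j - 1][1] + char_items[j - 1][2]  # trailing word
--         words.append((word, start, end - start))
--         i = j
--     return words
-- ===== Notes on version B (the rewrite author's own statement) =====
-- stated objective: alternative
-- what changed: Replaces A's single fold with accumulator state (current chars, pending word start, flush-on-separator plus a separate final-word epilogue) by a two-pointer run scan: skip separators, scan each maximal non-separator run at once, emit its word with end = following separator's start or run-last start+duration.
import Mathlib
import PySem

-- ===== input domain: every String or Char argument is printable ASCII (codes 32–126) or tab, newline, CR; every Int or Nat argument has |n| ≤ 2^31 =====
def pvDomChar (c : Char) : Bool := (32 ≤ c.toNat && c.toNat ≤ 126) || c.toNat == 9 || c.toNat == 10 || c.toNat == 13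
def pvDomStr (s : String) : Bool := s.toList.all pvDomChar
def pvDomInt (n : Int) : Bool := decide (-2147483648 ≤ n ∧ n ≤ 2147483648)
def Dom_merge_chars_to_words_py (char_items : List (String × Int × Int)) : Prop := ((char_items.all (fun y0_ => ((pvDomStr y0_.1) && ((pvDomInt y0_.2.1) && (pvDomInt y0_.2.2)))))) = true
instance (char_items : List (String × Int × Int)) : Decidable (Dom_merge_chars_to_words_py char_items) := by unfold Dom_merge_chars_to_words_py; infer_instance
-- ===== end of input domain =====

-- B replaces A's accumulator fold by a two-pointer run scan over maximal non-separator runs (alternative decomposition, same cost).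


-- ===== PORT A =====
-- state: (words, current_word_chars, word_start_ms)
def mergeStep (st : List (String × Int × Int) × List String × Int)
    (it : String × Int × Int) : List (String × Int × Int) × List String × Int :=
  if it.1 = "|" then
    if st.2.1 ≠ [] then
      (st.1 ++ [(PySem.Str.join "" st.2.1, st.2.2, it.2.1 - st.2.2)], [], st.2.2)
    else st
  else
    (st.1, st.2.1 ++ [it.1], if st.2.1 = [] then it.2.1 else st.2.2)

def merge_chars_to_words_py (char_items : List (String × Int × Int)) : List (String × Int × Int) :=
  if char_items = [] then []
  else
    let st := char_items.foldl mergeStep ([], [], 0)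
    if st.2.1 ≠ [] then
      let lc := (PySem.List.pyGet? char_items (-1)).getD ("", 0, 0)
      st.1 ++ [(PySem.Str.join "" st.2.1, st.2.2, (lc.2.1 + lc.2.2) - st.2.2)]
    else st.1

-- ===== PORT B =====
-- run scan: skip separators; for a non-separator head, take the whole maximal run,
-- emit (word, start, end-start) with end from the following separator (or run's last item), continue after the run.
def altGo (l : List (String × Int × Int)) : List (String × Int × Int) :=
  match l with
  | [] => []
  | (c, s, d) :: rest =>
    if c = "|" then altGo rest
    else
      let run : List (String × Int × Int) := (c, s, d) :: rest.takeWhile (fun it => it.1 ≠ "|")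
      let rest' := rest.dropWhile (fun it => it.1 ≠ "|")
      let word := PySem.Str.join "" (run.map (fun it => it.1))
      let endMs : Int :=
        match rest' with
        | (_, s', _) :: _ => s'
        | [] => (run.getLastD (c, s, d)).2.1 + (run.getLastD (c, s, d)).2.2
      (word, s, endMs - s) :: altGo rest'
termination_by l.length
decreasing_by
  · simp
  · simp only [List.length_cons]
    exact Nat.lt_succ_of_le (List.length_dropWhile_le _ _)

def merge_chars_to_words_py_alt (char_items : List (String × Int × Int)) : List (String × Int × Int) :=
  altGo char_items

-- ===== PRECONDITION & SPEC =====
def Spec_merge_chars_to_words_py (char_items : List (String × Int × Int)) (out : List (String × Int × Int)) : Prop := out = merge_chars_to_words_py_alt char_items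
instance (char_items : List (String × Int × Int)) (out : List (String × Int × Int)) : Decidable (Spec_merge_chars_to_words_py char_items out) := by unfold Spec_merge_chars_to_words_py; infer_instance

-- ===== CLAIM (what is proved, stated in full; the proofs are below) =====
def Claim_equal_merge_chars_to_words_py : Prop := ∀ (char_items : List (String × Int × Int)), Dom_merge_chars_to_words_py char_items → Spec_merge_chars_to_words_py char_items (merge_chars_to_words_py char_items)

-- ===== LEMMAS AND PROOFS =====

-- A's epilogue, parameterised by the list's last item (only consulted when a word is pending).
def finishWith (last : String × Int × Int)
    (st : List (String × Int × Int) × List String × Int) : List (String × Int × Int) :=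
  if st.2.1 ≠ [] then
    st.1 ++ [(PySem.Str.join "" st.2.1, st.2.2, (last.2.1 + last.2.2) - st.2.2)]
  else st.1

theorem foldl_run (run : List (String × Int × Int))
    (h : ∀ it ∈ run, it.1 ≠ "|") (words : List (String × Int × Int))
    (cur : List String) (ws : Int) (hc : cur ≠ []) :
    List.foldl mergeStep (words, cur, ws) run
      = (words, cur ++ run.map (fun it => it.1), ws) := by
  induction run generalizing cur with
  | nil => simp
  | cons it rest ih =>
    have h1 : it.1 ≠ "|" := h it (by simp)
    simp only [List.foldl_cons, mergeStep, if_neg h1, if_neg hc]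
    rw [ih (fun x hx => h x (by simp [hx])) (cur ++ [it.1]) (by simp)]
    simp

theorem getLast?_cons_ne_nil {α : Type} (a : α) (l : List α) (h : l ≠ []) :
    (a :: l).getLast? = l.getLast? := by
  cases l with
  | nil => exact absurd rfl h
  | cons b t => exact List.getLast?_cons_cons

theorem main_lemma (n : ℕ) : ∀ (t : List (String × Int × Int)), t.length ≤ n →
    ∀ (words : List (String × Int × Int)) (ws : Int) (last : String × Int × Int),
    (t ≠ [] → t.getLast? = some last) →
    finishWith last (List.foldl mergeStep (words, [], ws) t) = words ++ altGo t := by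
  induction n with
  | zero =>
    intro t hn words ws last hlast
    have : t = [] := List.eq_nil_of_length_eq_zero (Nat.le_zero.mp hn)
    subst this
    simp [finishWith, altGo]
  | succ n ih =>
    intro t hn words ws last hlast
    match t with
    | [] => simp [finishWith, altGo]
    | (c, s, d) :: rest =>
      by_cases hc : c = "|"
      · subst hc
        have hstep : mergeStep (words, [], ws) ("|", s, d) = (words, [], ws) := by
          simp [mergeStep]
        rw [List.foldl_cons, hstep]
        rw [ih rest (by simpa using Nat.le_of_succ_le_succ hn) words ws last
          (fun hne => by
            rw [← hlast (by simp)]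
            exact (getLast?_cons_ne_nil _ _ hne).symm)]
        simp [altGo]
      · -- non-separator head: split rest into the run and the remainder
        have hsplit : rest = rest.takeWhile (fun it => it.1 ≠ "|")
            ++ rest.dropWhile (fun it => it.1 ≠ "|") :=
          (List.takeWhile_append_dropWhile).symm
        have hstep : mergeStep (words, [], ws) (c, s, d) = (words, [c], s) := by
          simp [mergeStep, hc]
        rw [List.foldl_cons, hstep]
        conv_lhs => rw [show rest = rest.takeWhile (fun it => it.1 ≠ "|")
            ++ rest.dropWhile (fun it => it.1 ≠ "|") from hsplit]
        rw [List.foldl_append]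
        rw [foldl_run _ (fun it hit => by
              have := List.mem_takeWhile_imp hit
              simpa using this) words [c] s (by simp)]
        cases hdw : rest.dropWhile (fun it => it.1 ≠ "|") with
        | nil =>
          -- whole list is one word run
          simp only [List.foldl_nil]
          have ht : (c, s, d) :: rest = (c, s, d) :: rest.takeWhile (fun it => it.1 ≠ "|") := by
            conv_lhs => rw [hsplit, hdw]
            simp
          have hlast' : last = (((c, s, d) :: rest.takeWhile (fun it => it.1 ≠ "|")).getLastD (c, s, d)) := by
            have := hlast (by simp)
            rw [ht] at this
            rw [List.getLastD_eq_getLast?, this]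
            rfl
          simp only [altGo, if_neg hc, hdw]
          simp [finishWith, hlast']
        | cons sepIt rest'' =>
          have hsep : sepIt.1 = "|" := by
            have := List.head?_dropWhile_not (fun it => it.1 ≠ "|") rest
            rw [hdw] at this
            simpa using this
          obtain ⟨cs, ss, ds⟩ := sepIt
          simp only at hsep
          subst hsep
          rw [List.foldl_cons]
          have hstep2 : mergeStep (words, [c] ++ (rest.takeWhile (fun it => it.1 ≠ "|")).map (fun it => it.1), s) ("|", ss, ds)
              = (words ++ [(PySem.Str.join "" ([c] ++ (rest.takeWhile (fun it => it.1 ≠ "|")).map (fun it => it.1)), s, ss - s)], [], s) := by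
            simp [mergeStep]
          rw [hstep2]
          have hlen : rest''.length ≤ n := by
            have h1 : (rest.dropWhile (fun it => it.1 ≠ "|")).length ≤ rest.length :=
              List.length_dropWhile_le _ _
            rw [hdw] at h1
            simp only [List.length_cons] at h1 hn
            omega
          rw [ih rest'' hlen _ s last (fun hne => by
            have := hlast (by simp)
            rw [show (c, s, d) :: rest = ((c, s, d) :: rest.takeWhile (fun it => it.1 ≠ "|")) ++ (("|", ss, ds) :: rest'') from by
              conv_lhs => rw [hsplit, hdw]
              simp] at this
            rw [List.getLast?_append_of_ne_nil _ (by simp)] at this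
            rw [← this]
            exact (getLast?_cons_ne_nil _ _ hne).symm)]
          simp only [altGo, if_neg hc, hdw]
          simp

theorem pyGet_neg_one_getD (l : List (String × Int × Int)) (hne : l ≠ []) :
    (PySem.List.pyGet? l (-1)).getD ("", 0, 0) = l.getLast hne := by
  rw [PySem.List.pyGet?_neg_one, List.getLast?_eq_some_getLast hne]
  rfl

-- ===== VERDICT (by name: the statement is the Claim_ definition above) =====
theorem merge_chars_to_words_py_spec : Claim_equal_merge_chars_to_words_py := by
  intro l _
  unfold Spec_merge_chars_to_words_py merge_chars_to_words_py merge_chars_to_words_py_alt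
  by_cases hne : l = []
  · subst hne; simp [altGo]
  · simp only [if_neg hne]
    have := main_lemma l.length l le_rfl [] 0 (l.getLast hne)
      (fun _ => List.getLast?_eq_some_getLast hne)
    rw [pyGet_neg_one_getD l hne]
    simpa [finishWith] using this
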